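-- pv_equiv track=rewrite | github.com/malteristo/reflow | src/research_agent_backend/core/rag_query_engine.py | _apply_term_capitalizations
-- ===== SOURCE A (Python) =====
-- from typing import Dict, List, Any, Optional, Union, Tuple, TypeVar, Generic
--
-- def _apply_term_capitalizations(original_query: str,
--                               key_terms: List[str]) -> List[str]:
--     """Apply proper capitalizations for known terms."""
--     capitalized_terms = []
--
--     for term in key_terms:
--         if term == 'ai':
--             capitalized_terms.append('AI')
--         elif term == 'django':
--             capitalized_terms.append('Django')
--         elif term == 'python' and 'Python' in original_query:
--             capitalized_terms.append('Python')
--         else: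
--             capitalized_terms.append(term)
--
--     return capitalized_terms
-- ===== SOURCE B (Python) =====
-- def _substitute(terms, old, new):
--     """Return a copy of terms with every occurrence of old replaced by new."""
--     return [new if t == old else t for t in terms]
--
--
-- def _apply_term_capitalizations(original_query, key_terms):
--     """Apply proper capitalizations for known terms."""
--     result = _substitute(key_terms, 'ai', 'AI')
--     result = _substitute(result, 'django', 'Django')
--     if 'Python' in original_query:
--         result = _substitute(result, 'python', 'Python')
--     return result
-- ===== Notes on version B (the rewrite author's own statement) =====
-- stated objective: alternative
-- what changed: Replaces A's single pass with a per-element if/elif chain by staged whole-list substitution passes: one full pass per known term ('ai' then 'django', and a third conditional pass for 'python' only when 'Python' occurs in the query), correct because the passes touch disjoint source terms and no replacement value is itself a source term.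
import Mathlib
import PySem

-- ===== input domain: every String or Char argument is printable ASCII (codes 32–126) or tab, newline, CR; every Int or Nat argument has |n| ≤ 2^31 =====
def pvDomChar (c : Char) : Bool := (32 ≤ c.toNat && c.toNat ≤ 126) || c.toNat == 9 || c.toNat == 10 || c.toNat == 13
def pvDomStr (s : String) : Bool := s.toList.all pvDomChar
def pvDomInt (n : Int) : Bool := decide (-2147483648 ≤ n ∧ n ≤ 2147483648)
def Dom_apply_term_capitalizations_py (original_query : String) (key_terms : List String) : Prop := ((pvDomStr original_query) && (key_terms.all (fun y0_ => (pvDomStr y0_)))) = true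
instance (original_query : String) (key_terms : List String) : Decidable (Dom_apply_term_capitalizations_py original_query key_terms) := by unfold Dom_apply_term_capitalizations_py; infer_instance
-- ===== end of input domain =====

-- B replaces A's single pass with a per-element if/elif chain by staged whole-list
-- substitution passes, one per known term, the 'python' pass run only when "Python"
-- occurs in the query (alternative decomposition; not faster).

-- ===== PORT A =====
-- Port of A: per-element if/elif chain, appending to an accumulator list.
def apply_term_capitalizations_py (original_query : String) (key_terms : List String) : List String :=
  key_terms.foldl (fun capitalized_terms term =>
    if term = "ai" then capitalized_terms ++ ["AI"]
    else if term = "django" then capitalized_terms ++ ["Django"]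
    else if term = "python" ∧ PySem.Str.isIn "Python" original_query then capitalized_terms ++ ["Python"]
    else capitalized_terms ++ [term]) []

-- ===== PORT B =====
-- helper _substitute: one full pass replacing every occurrence of old by new
def pvSubstitute (terms : List String) (old : String) (new : String) : List String :=
  terms.map (fun t => if t = old then new else t)

-- Port of B: staged whole-list substitution passes, the last one conditional.
def apply_term_capitalizations_py_alt (original_query : String) (key_terms : List String) : List String :=
  let result := pvSubstitute key_terms "ai" "AI"
  let result := pvSubstitute result "django" "Django"
  if PySem.Str.isIn "Python" original_query then pvSubstitute result "python" "Python"
  else result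

-- ===== PRECONDITION & SPEC =====
def Spec_apply_term_capitalizations_py (original_query : String) (key_terms : List String) (out : List String) : Prop := out = apply_term_capitalizations_py_alt original_query key_terms
instance (original_query : String) (key_terms : List String) (out : List String) : Decidable (Spec_apply_term_capitalizations_py original_query key_terms out) := by unfold Spec_apply_term_capitalizations_py; infer_instance

-- ===== CLAIM (what is proved, stated in full; the proofs are below) =====
def Claim_equal_apply_term_capitalizations_py : Prop := ∀ (original_query : String) (key_terms : List String), Dom_apply_term_capitalizations_py original_query key_terms → Spec_apply_term_capitalizations_py original_query key_terms (apply_term_capitalizations_py original_query key_terms)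

-- ===== LEMMAS AND PROOFS =====
-- the per-element value A computes
def pvStep (original_query : String) (term : String) : String :=
  if term = "ai" then "AI"
  else if term = "django" then "Django"
  else if term = "python" ∧ PySem.Str.isIn "Python" original_query then "Python"
  else term

theorem pvFoldA (original_query : String) (key_terms : List String) :
    ∀ acc, key_terms.foldl (fun capitalized_terms term =>
      if term = "ai" then capitalized_terms ++ ["AI"]
      else if term = "django" then capitalized_terms ++ ["Django"]
      else if term = "python" ∧ PySem.Str.isIn "Python" original_query then capitalized_terms ++ ["Python"]
      else capitalized_terms ++ [term]) acc
    = acc ++ key_terms.map (pvStep original_query) := by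
  induction key_terms with
  | nil => intro acc; simp
  | cons t ts ih =>
    intro acc
    simp only [List.foldl_cons, List.map_cons, ih, pvStep]
    split_ifs <;> simp

-- the staged passes compute the same per-element value
theorem pvStagedEq (original_query : String) (term : String) :
    (if PySem.Str.isIn "Python" original_query then
       (fun t => if t = "python" then "Python" else t)
         ((fun t => if t = "django" then "Django" else t)
           ((fun t => if t = "ai" then "AI" else t) term))
     else
       (fun t => if t = "django" then "Django" else t)
         ((fun t => if t = "ai" then "AI" else t) term))
    = pvStep original_query term := by
  by_cases hp : PySem.Str.isIn "Python" original_query = true <;>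
    simp only [hp, if_true, if_false, Bool.not_eq_true, pvStep] <;>
    split_ifs <;> simp_all

-- ===== VERDICT =====
theorem apply_term_capitalizations_py_spec : Claim_equal_apply_term_capitalizations_py := by
  intro original_query key_terms _
  unfold Spec_apply_term_capitalizations_py apply_term_capitalizations_py apply_term_capitalizations_py_alt pvSubstitute
  rw [pvFoldA]
  simp only [List.nil_append, List.map_map]
  by_cases hp : PySem.Str.isIn "Python" original_query = true
  · simp only [hp, if_true]
    refine (List.map_congr_left (fun t _ => ?_))
    have := pvStagedEq original_query t
    simp only [hp, if_true] at this
    simpa [Function.comp] using this.symm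
  · simp only [hp, if_false]
    refine (List.map_congr_left (fun t _ => ?_))
    have := pvStagedEq original_query t
    simp only [hp, if_false] at this
    simpa [Function.comp] using this.symm
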